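-- pv_equiv track=rewrite | github.com/sonusario/ARCHIVE | The-Archive/trinary/ordered_gate_checker.py | sub_imp
-- ===== SOURCE A (Python) =====
-- def conv_char(char):
--     if char == 'P':
--         return 'p'
--     elif char == 'Q':
--         return 'q'
--     return char
--
-- def sub_imp(function_code):
--     if len(function_code) == 2:
--         return conv_char(function_code[0]) + "," + conv_char(function_code[1])
--     if function_code[0] == 'I':
--         tail = function_code[-3:]
--         if 'I' in tail:
--             s1_string = "imp(" + sub_imp(function_code[1:-3]) + ")"
--             s2_string = "imp(" + conv_char(tail[1]) + "," + conv_char(tail[2]) + ")"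
--         else:
--             s1_string = "imp(" + sub_imp(function_code[1:-1]) + ")"
--             s2_string = conv_char(function_code[-1])
--     else:
--         s1_string = conv_char(function_code[0])
--         s2_string = "imp(" + sub_imp(function_code[2:]) + ")"
--     return s1_string + "," + s2_string
-- ===== SOURCE B (Python) =====
-- def conv_char(char):
--     if char == 'P':
--         return 'p'
--     elif char == 'Q':
--         return 'q'
--     return char
--
-- def sub_imp(function_code):
--     # Two phases: (1) peel the code into a list of abstract frames (no string
--     # building), (2) fold the frames back-to-front into the rendered string.
--     frames = []
--     code = function_code
--     while len(code) != 2: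
--         if code[0] == 'I':
--             tail = code[-3:]
--             if 'I' in tail:
--                 frames.append(('II', tail[1], tail[2]))
--                 code = code[1:-3]
--             else:
--                 frames.append(('I1', code[-1], ''))
--                 code = code[1:-1]
--         else:
--             frames.append(('L', code[0], ''))
--             code = code[2:]
--     out = conv_char(code[0]) + "," + conv_char(code[1])
--     for kind, a, b in reversed(frames):
--         if kind == 'II':
--             out = "imp(" + out + "),imp(" + conv_char(a) + "," + conv_char(b) + ")"
--         elif kind == 'I1':
--             out = "imp(" + out + ")," + conv_char(a)
--         else:
--             out = conv_char(a) + ",imp(" + out + ")"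
--     return out
-- ===== Notes on version B (the rewrite author's own statement) =====
-- stated objective: alternative
-- what changed: Splits A's single recursive string-builder into two passes: a loop that peels the code into a list of abstract frames (no string building), then a reversed fold that renders the frames into the output string.
import Mathlib
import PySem

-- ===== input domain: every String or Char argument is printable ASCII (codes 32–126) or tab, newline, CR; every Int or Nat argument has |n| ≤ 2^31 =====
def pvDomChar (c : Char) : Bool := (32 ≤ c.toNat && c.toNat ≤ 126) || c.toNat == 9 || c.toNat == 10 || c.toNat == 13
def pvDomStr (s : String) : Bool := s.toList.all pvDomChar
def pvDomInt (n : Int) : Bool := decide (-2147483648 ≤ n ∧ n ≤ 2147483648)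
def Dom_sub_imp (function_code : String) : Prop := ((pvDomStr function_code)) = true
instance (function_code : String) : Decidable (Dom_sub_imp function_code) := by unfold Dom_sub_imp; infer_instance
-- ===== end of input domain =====

-- B splits A's recursive string-builder into two phases: peel the code into a list
-- of abstract frames, then fold the frames back-to-front into the rendered string
-- (same asymptotic cost; a different decomposition separating parsing from rendering).

-- ===== PORT A =====
def convChar (c : Char) : List Char :=
  if c = 'P' then ['p'] else if c = 'Q' then ['q'] else [c]

-- literal port of A's recursion on the character list of function_code;
-- where Python raises IndexError (the recursion reaching a string of length < 2,
-- excluded by Pre_) the port returns [] / a blank default character instead.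
def subImpGoA (l : List Char) : List Char :=
  if l.length = 2 then
    convChar (l.getD 0 ' ') ++ [','] ++ convChar (l.getD 1 ' ')
  else
    match l with
    | [] => []          -- Python: IndexError on function_code[0]
    | c :: rest =>
      let l := c :: rest
      if c = 'I' then
        let tail := PySem.List.slice l (some (-3)) none
        if tail.contains 'I' then
          ['i','m','p','('] ++ subImpGoA (PySem.List.slice l (some 1) (some (-3))) ++ [')']
            ++ [','] ++ (['i','m','p','('] ++ convChar (tail.getD 1 ' ') ++ [','] ++ convChar (tail.getD 2 ' ') ++ [')'])
        else
          ['i','m','p','('] ++ subImpGoA (PySem.List.slice l (some 1) (some (-1))) ++ [')']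
            ++ [','] ++ convChar (PySem.List.pyGetD l (-1) ' ')
      else
        convChar c ++ [','] ++ (['i','m','p','('] ++ subImpGoA (PySem.List.slice l (some 2) none) ++ [')'])
termination_by l.length
decreasing_by
  all_goals simp [PySem.List.slice, PySem.List.clampIdx]

def sub_imp (function_code : String) : String :=
  String.ofList (subImpGoA function_code.toList)

-- ===== PORT B =====
-- port of Source B: phase 1 peels the code into frames, phase 2 renders them.
inductive PvFrame : Type
  | ii : Char → Char → PvFrame     -- ('II', a, b)
  | i1 : Char → PvFrame            -- ('I1', a, '')
  | lft : Char → PvFrame           -- ('L', a, '')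
deriving DecidableEq, Repr

-- phase 1: the while-loop, as a recursion that records one frame per round and
-- returns the frames together with the final two-character base code
def peelGate (l : List Char) : List PvFrame × List Char :=
  if l.length = 2 then ([], l)
  else
    match l with
    | [] => ([], [])    -- Python: IndexError on code[0]
    | c :: rest =>
      let l := c :: rest
      if c = 'I' then
        let tail := PySem.List.slice l (some (-3)) none
        if tail.contains 'I' then
          let p := peelGate (PySem.List.slice l (some 1) (some (-3)))
          (PvFrame.ii (tail.getD 1 ' ') (tail.getD 2 ' ') :: p.1, p.2)
        else
          let p := peelGate (PySem.List.slice l (some 1) (some (-1)))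
          (PvFrame.i1 (PySem.List.pyGetD l (-1) ' ') :: p.1, p.2)
      else
        let p := peelGate (PySem.List.slice l (some 2) none)
        (PvFrame.lft c :: p.1, p.2)
termination_by l.length
decreasing_by
  all_goals simp [PySem.List.slice, PySem.List.clampIdx]

-- phase 2: one rendering step (the body of Source B's `for ... in reversed(frames)`)
def renderFrame (f : PvFrame) (out : List Char) : List Char :=
  match f with
  | PvFrame.ii a b =>
      ['i','m','p','('] ++ out ++ [')',',','i','m','p','('] ++ convChar a ++ [','] ++ convChar b ++ [')']
  | PvFrame.i1 a =>
      ['i','m','p','('] ++ out ++ [')',','] ++ convChar a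
  | PvFrame.lft a =>
      convChar a ++ [',','i','m','p','('] ++ out ++ [')']

-- the loop over reversed(frames) is a right fold over the frame list
def sub_imp_alt (function_code : String) : String :=
  let p := peelGate function_code.toList
  String.ofList
    (p.1.foldr renderFrame (convChar (p.2.getD 0 ' ') ++ [','] ++ convChar (p.2.getD 1 ' ')))

-- ===== PRECONDITION & SPEC =====
-- Pre_ holds exactly on well-formed gate codes: strings whose outermost-operator
-- decomposition (the grammar A parses) bottoms out at a two-character atom; on every
-- other string Python A raises IndexError when its recursion reaches a string of
-- length < 2.  The accepted set is inherently recursive (it is a grammar), so the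
-- checker is a structural recursion; the fuel equals the string length, which each
-- step (stripping at least two characters) can never exhaust, so it is exact.
def wellFormedGate (fuel : Nat) (l : List Char) : Bool :=
  match fuel with
  | 0 => false
  | fuel + 1 =>
    if l.length = 2 then true
    else
      match l with
      | [] => false
      | c :: rest =>
        let l := c :: rest
        if c = 'I' then
          if (PySem.List.slice l (some (-3)) none).contains 'I' then
            wellFormedGate fuel (PySem.List.slice l (some 1) (some (-3)))
          else
            wellFormedGate fuel (PySem.List.slice l (some 1) (some (-1)))
        else
          wellFormedGate fuel (PySem.List.slice l (some 2) none)

def Pre_sub_imp (function_code : String) : Prop :=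
  wellFormedGate function_code.toList.length function_code.toList = true
instance (function_code : String) : Decidable (Pre_sub_imp function_code) := by
  unfold Pre_sub_imp; infer_instance

def pvWitness_sub_imp : String := "IPQR"

def Spec_sub_imp (function_code : String) (out : String) : Prop := out = sub_imp_alt function_code
instance (function_code : String) (out : String) : Decidable (Spec_sub_imp function_code out) := by unfold Spec_sub_imp; infer_instance

-- ===== CLAIM (what is proved, stated in full; the proofs are below) =====
def Claim_equal_sub_imp : Prop := ∀ (function_code : String), Dom_sub_imp function_code → Pre_sub_imp function_code → Spec_sub_imp function_code (sub_imp function_code)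

-- ===== LEMMAS AND PROOFS =====

-- on well-formed codes, rendering the peeled frames gives exactly A's recursion
lemma peel_render_eq (fuel : Nat) :
    ∀ (l : List Char), wellFormedGate fuel l = true →
      ((peelGate l).1.foldr renderFrame
        (convChar ((peelGate l).2.getD 0 ' ') ++ [','] ++ convChar ((peelGate l).2.getD 1 ' ')))
        = subImpGoA l := by
  induction fuel with
  | zero => intro l h; simp [wellFormedGate] at h
  | succ n ih =>
    intro l h
    by_cases h2 : l.length = 2
    · unfold peelGate subImpGoA
      simp [h2]
    · cases l with
      | nil => simp [wellFormedGate] at h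
      | cons c rest =>
        unfold wellFormedGate at h
        simp only [if_neg h2] at h
        unfold peelGate subImpGoA
        simp only [if_neg h2]
        by_cases hI : c = 'I'
        · subst hI
          by_cases hT : (PySem.List.slice ('I' :: rest) (some (-3)) none).contains 'I'
          · simp only [hT, if_true] at h ⊢
            rw [List.foldr_cons, ih _ h]
            simp [renderFrame, List.append_assoc]
          · simp only [hT, Bool.false_eq_true, if_false, if_true] at h ⊢
            rw [List.foldr_cons, ih _ h]
            simp [renderFrame, List.append_assoc]
        · simp only [if_neg hI] at h ⊢
          rw [List.foldr_cons, ih _ h]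
          simp [renderFrame, List.append_assoc]

-- ===== VERDICT (by name: the statement is the Claim_ definition above) =====
theorem sub_imp_spec : Claim_equal_sub_imp := by
  intro fc _ hpre
  unfold Spec_sub_imp sub_imp sub_imp_alt
  simp only []
  rw [peel_render_eq fc.toList.length fc.toList hpre]
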